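-- pv_equiv track=rewrite | github.com/trongtuyen99/topic_news_classification | prepro_code/preprocess.py | join_name
-- ===== SOURCE A (Python) =====
-- def join_name(text):
--     words = text.split()
--     rs = ""
--     uppercase = []
--     for w in words:
--         if (w[0].isupper()):
--             uppercase.append(w)
--         else:
--             if (len(uppercase) == 0):
--                 rs = rs + " " + w
--             elif (len(uppercase) == 1):
--                 rs = rs + " " + uppercase[0] + " " + w
--                 uppercase.clear()
--             else:
--                 rs = rs + " " + "_".join(uppercase) + " " + w
--                 uppercase.clear()
--     return rs
-- ===== SOURCE B (Python) =====
-- def _cap(w):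
--     return w[0].isupper()
--
--
-- def _runs(words):
--     # maximal runs of consecutive words with equal capitalization of the first letter
--     runs = []
--     i = 0
--     while i < len(words):
--         up = _cap(words[i])
--         j = i + 1
--         while j < len(words) and _cap(words[j]) == up:
--             j += 1
--         runs.append((up, words[i:j]))
--         i = j
--     return runs
--
--
-- def join_name(text):
--     tokens = []
--     pending = None  # a trailing uppercase run is never emitted
--     for up, run in _runs(text.split()):
--         if up:
--             pending = run
--         else:
--             if pending is not None:
--                 tokens.append("_".join(pending))
--                 pending = None
--             tokens.extend(run)
--     return "".join(" " + t for t in tokens)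
-- ===== Notes on version B (the rewrite author's own statement) =====
-- stated objective: faster
-- what changed: A builds the result by repeated string concatenation onto a growing accumulator while buffering uppercase words; B first groups the words into maximal same-capitalization runs, maps the runs to a token list (joined uppercase run before each lowercase run, trailing uppercase run dropped), and joins all tokens once at the end.
import Mathlib
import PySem

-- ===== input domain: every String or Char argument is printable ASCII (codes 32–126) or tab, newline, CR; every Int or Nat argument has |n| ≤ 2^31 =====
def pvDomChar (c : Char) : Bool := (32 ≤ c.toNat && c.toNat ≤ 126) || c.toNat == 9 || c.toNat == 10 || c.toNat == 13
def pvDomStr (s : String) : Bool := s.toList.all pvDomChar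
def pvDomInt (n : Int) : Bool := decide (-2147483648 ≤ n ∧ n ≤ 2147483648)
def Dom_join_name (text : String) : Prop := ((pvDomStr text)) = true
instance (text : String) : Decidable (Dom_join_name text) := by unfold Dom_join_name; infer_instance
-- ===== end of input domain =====

-- B replaces A's single pass with a quadratic string accumulator by a run-grouping pass plus a token list
-- joined once at the end, avoiding repeated concatenation onto the accumulator; return values proved equal.

-- shared tiny accessor for Python's `w[0].isupper()` (words from split() are nonempty, so pyGet? is some)
def cap0 (w : String) : Bool := ((PySem.Str.pyGet? w 0).map PySem.Chars.isupper).getD false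

-- ===== PORT A =====
def join_name (text : String) : String :=
  let words := PySem.Str.split₀ text
  (words.foldl
    (fun (st : String × List String) (w : String) =>
      if cap0 w then (st.1, st.2 ++ [w])
      else if st.2.length = 0 then (st.1 ++ " " ++ w, st.2)
      else if st.2.length = 1 then
        (st.1 ++ " " ++ ((PySem.List.pyGet? st.2 0).getD "") ++ " " ++ w, [])
      else (st.1 ++ " " ++ PySem.Str.join "_" st.2 ++ " " ++ w, []))
    ("", [])).1

-- ===== PORT B =====
-- maximal runs of consecutive words with equal capitalization (Source B's _runs; the inner while = takeWhile/dropWhile)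
def runsB (words : List String) : List (Bool × List String) :=
  match words with
  | [] => []
  | w :: ws =>
    (cap0 w, w :: ws.takeWhile (fun x => cap0 x == cap0 w)) ::
      runsB (ws.dropWhile (fun x => cap0 x == cap0 w))
termination_by words.length
decreasing_by
  have h := List.length_dropWhile_le (fun x => cap0 x == cap0 w) ws
  simp only [List.length_cons]
  omega

def join_name_alt (text : String) : String :=
  let tokens := ((runsB (PySem.Str.split₀ text)).foldl
    (fun (st : List String × Option (List String)) (r : Bool × List String) =>
      if r.1 then (st.1, some r.2)
      else (st.1 ++ (match st.2 with | none => [] | some p => [PySem.Str.join "_" p]) ++ r.2, none))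
    ([], none)).1
  String.join (tokens.map (fun t => " " ++ t))

-- ===== PRECONDITION & SPEC =====
def Spec_join_name (text : String) (out : String) : Prop := out = join_name_alt text
instance (text : String) (out : String) : Decidable (Spec_join_name text out) := by unfold Spec_join_name; infer_instance

-- ===== CLAIM (what is proved, stated in full; the proofs are below) =====
def Claim_equal_join_name : Prop := ∀ (text : String), Dom_join_name text → Spec_join_name text (join_name text)

-- ===== LEMMAS AND PROOFS =====

def joinU (l : List String) : String := PySem.Str.join "_" l

def tokStr (ts : List String) : String := String.join (ts.map (fun t => " " ++ t))

-- A's loop body, named for the proofs (definitionally the lambda in join_name)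
def fA (st : String × List String) (w : String) : String × List String :=
  if cap0 w then (st.1, st.2 ++ [w])
  else if st.2.length = 0 then (st.1 ++ " " ++ w, st.2)
  else if st.2.length = 1 then
    (st.1 ++ " " ++ ((PySem.List.pyGet? st.2 0).getD "") ++ " " ++ w, [])
  else (st.1 ++ " " ++ PySem.Str.join "_" st.2 ++ " " ++ w, [])

-- B's token-loop body, named for the proofs
def fB (st : List String × Option (List String)) (r : Bool × List String) :
    List String × Option (List String) :=
  if r.1 then (st.1, some r.2)
  else (st.1 ++ (match st.2 with | none => [] | some p => [joinU p]) ++ r.2, none)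

-- the common rendering both programs compute
def R : List String → List String → String
  | _, [] => ""
  | upp, w :: ws =>
    if cap0 w then R (upp ++ [w]) ws
    else (if upp = [] then " " ++ w else " " ++ joinU upp ++ " " ++ w) ++ R [] ws

lemma join_name_eq (text : String) :
    join_name text = ((PySem.Str.split₀ text).foldl fA ("", [])).1 := rfl

lemma join_name_alt_eq (text : String) :
    join_name_alt text =
      tokStr (((runsB (PySem.Str.split₀ text)).foldl fB ([], none)).1) := rfl

lemma tokStr_nil : tokStr [] = "" := rfl

lemma join_foldl (l : List String) (s : String) : l.foldl (· ++ ·) s = s ++ String.join l := by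
  induction l generalizing s with
  | nil => rw [show String.join [] = "" from rfl, String.append_empty]; rfl
  | cons x xs ih =>
    rw [List.foldl_cons, ih, show String.join (x :: xs) = (x :: xs).foldl (· ++ ·) "" from rfl,
      List.foldl_cons, ih, String.empty_append, String.append_assoc]

lemma join_cons (x : String) (xs : List String) :
    String.join (x :: xs) = x ++ String.join xs := by
  show (x :: xs).foldl (· ++ ·) "" = _
  rw [List.foldl_cons, join_foldl, String.empty_append]

lemma tokStr_cons (t : String) (ts : List String) :
    tokStr (t :: ts) = " " ++ t ++ tokStr ts := by
  simp [tokStr, join_cons, String.append_assoc]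

lemma tokStr_append (a b : List String) : tokStr (a ++ b) = tokStr a ++ tokStr b := by
  induction a with
  | nil => simp [tokStr_nil, String.empty_append]
  | cons x xs ih => simp [tokStr_cons, ih, String.append_assoc]

-- A's fold from any state produces its accumulator followed by R
lemma Afold (ws : List String) : ∀ rs upp, ((ws.foldl fA (rs, upp)).1 = rs ++ R upp ws) := by
  induction ws with
  | nil => intro rs upp; simp [R, String.append_empty]
  | cons w ws ih =>
    intro rs upp
    rw [List.foldl_cons]
    by_cases h : cap0 w = true
    · rw [show fA (rs, upp) w = (rs, upp ++ [w]) from by simp [fA, h], ih]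
      simp [R, h]
    · have hR : R upp (w :: ws) =
          (if upp = [] then " " ++ w else " " ++ joinU upp ++ " " ++ w) ++ R [] ws := by
        simp [R, h]
      match upp with
      | [] =>
        rw [show fA (rs, []) w = (rs ++ " " ++ w, []) from by simp [fA, h], ih, hR]
        simp [String.append_assoc]
      | [u] =>
        have : fA (rs, [u]) w = (rs ++ " " ++ u ++ " " ++ w, []) := by
          simp [fA, h, PySem.List.pyGet?, PySem.List.pyIdx?]
        rw [this, ih, hR]
        simp [joinU, PySem.Str.join, String.append_assoc]
      | u :: v :: rest =>
        have : fA (rs, u :: v :: rest) w =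
            (rs ++ " " ++ joinU (u :: v :: rest) ++ " " ++ w, []) := by
          simp [fA, h, joinU]
        rw [this, ih, hR]
        simp [String.append_assoc]

-- the value pTok: what B's token fold appends to its accumulator
def pTok : Option (List String) → List (Bool × List String) → List String
  | _, [] => []
  | _, (true, r) :: rest => pTok (some r) rest
  | prev, (false, r) :: rest =>
    (match prev with | none => [] | some p => [joinU p]) ++ r ++ pTok none rest

lemma Bfold (rl : List (Bool × List String)) :
    ∀ toks prev, ((rl.foldl fB (toks, prev)).1 = toks ++ pTok prev rl) := by
  induction rl with
  | nil => intro toks prev; simp [pTok]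
  | cons r rest ih =>
    intro toks prev
    obtain ⟨b, run⟩ := r
    cases b with
    | true =>
      rw [List.foldl_cons, show fB (toks, prev) (true, run) = (toks, some run) from by
        simp [fB], ih]
      simp [pTok]
    | false =>
      rw [List.foldl_cons, show fB (toks, prev) (false, run) =
          (toks ++ (match prev with | none => [] | some p => [joinU p]) ++ run, none) from by
        simp [fB], ih]
      cases prev <;> simp [pTok, List.append_assoc]

lemma head_dropWhile {α : Type} (p : α → Bool) (l : List α) :
    ∀ x ∈ (l.dropWhile p).head?, p x = false := by
  induction l with
  | nil => simp [List.dropWhile]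
  | cons a l ih =>
    intro x hx
    rw [List.dropWhile_cons] at hx
    split at hx
    · exact ih x hx
    · simp_all

lemma R_upper_run (tw : List String) :
    ∀ rest upp, (∀ x ∈ tw, cap0 x = true) → R upp (tw ++ rest) = R (upp ++ tw) rest := by
  induction tw with
  | nil => simp
  | cons x xs ih =>
    intro rest upp h
    have hx : cap0 x = true := h x (by simp)
    simp only [List.cons_append, R, hx]
    rw [ih rest (upp ++ [x]) (fun y hy => h y (by simp [hy]))]
    simp

lemma R_lower_run (tw : List String) :
    ∀ rest, (∀ x ∈ tw, cap0 x = false) → R [] (tw ++ rest) = tokStr tw ++ R [] rest := by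
  induction tw with
  | nil => intro rest _; simp [tokStr_nil, String.empty_append]
  | cons x xs ih =>
    intro rest h
    have hx : cap0 x = false := h x (by simp)
    simp only [List.cons_append, R, hx, Bool.false_eq_true]
    rw [ih rest (fun y hy => h y (by simp [hy])), tokStr_cons]
    simp [String.append_assoc]

lemma main_lemma (n : ℕ) : ∀ (words upp : List String), words.length ≤ n →
    (upp = [] ∨ ∀ w ∈ words.head?, cap0 w = false) →
    tokStr (pTok (if upp = [] then none else some upp) (runsB words)) = R upp words := by
  induction n with
  | zero =>
    intro words upp hlen _
    have : words = [] := List.length_eq_zero_iff.mp (Nat.le_zero.mp hlen)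
    subst this
    split <;> simp [runsB, pTok, tokStr_nil, R]
  | succ n ih =>
    intro words upp hlen hcond
    match words with
    | [] => split <;> simp [runsB, pTok, tokStr_nil, R]
    | w :: ws =>
      rw [runsB]
      by_cases h : cap0 w = true
      · -- uppercase run: upp must be [] by the side condition
        have hupp : upp = [] := by
          rcases hcond with h' | h'
          · exact h'
          · exact absurd (h' w (by simp)) (by simp [h])
        subst hupp
        set tw := ws.takeWhile (fun x => cap0 x == cap0 w) with htw
        set rest := ws.dropWhile (fun x => cap0 x == cap0 w) with hrest
        have hsplit : ws = tw ++ rest := (List.takeWhile_append_dropWhile).symm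
        have htwcap : ∀ x ∈ tw, cap0 x = true := by
          intro x hx
          have := List.mem_takeWhile_imp hx
          simpa [h] using this
        have hrestlow : ∀ x ∈ rest.head?, cap0 x = false := by
          intro x hx
          have := head_dropWhile (fun x => cap0 x == cap0 w) ws x (by rw [← hrest]; exact hx)
          simpa [h] using this
        have hlen' : rest.length ≤ n := by
          have h1 := List.length_dropWhile_le (fun x => cap0 x == cap0 w) ws
          have h2 : ws.length + 1 ≤ n + 1 := by simpa using hlen
          rw [← hrest] at h1
          omega
        have hih := ih rest (w :: tw) hlen' (Or.inr hrestlow)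
        rw [if_neg (List.cons_ne_nil w tw)] at hih
        simp only [h, pTok]
        rw [hih]
        have : R [] (w :: ws) = R [w] ws := by simp [R, h]
        rw [this, hsplit, R_upper_run tw rest [w] htwcap]
        simp
      · -- lowercase run
        have hlow : cap0 w = false := by simpa using h
        set tw := ws.takeWhile (fun x => cap0 x == cap0 w) with htw
        set rest := ws.dropWhile (fun x => cap0 x == cap0 w) with hrest
        have hsplit : ws = tw ++ rest := (List.takeWhile_append_dropWhile).symm
        have htwlow : ∀ x ∈ tw, cap0 x = false := by
          intro x hx
          have := List.mem_takeWhile_imp hx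
          simpa [hlow] using this
        have hlen' : rest.length ≤ n := by
          have h1 := List.length_dropWhile_le (fun x => cap0 x == cap0 w) ws
          have h2 : ws.length + 1 ≤ n + 1 := by simpa using hlen
          rw [← hrest] at h1
          omega
        have hih := ih rest [] hlen' (Or.inl rfl)
        simp only [reduceIte] at hih
        have hR : R upp (w :: ws) =
            (if upp = [] then " " ++ w else " " ++ joinU upp ++ " " ++ w) ++ R [] ws := by
          simp [R, hlow]
        rw [hR, hsplit, R_lower_run tw rest htwlow]
        by_cases hu : upp = []
        · subst hu
          simp only [reduceIte, hlow, pTok]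
          rw [tokStr_append, hih]
          simp [tokStr_cons, String.append_assoc]
        · rw [if_neg hu, if_neg hu]
          simp only [hlow, pTok]
          rw [tokStr_append, tokStr_append, hih, tokStr_cons, tokStr_cons, tokStr_nil]
          simp [String.append_empty, String.append_assoc]

lemma ports_agree (text : String) : join_name text = join_name_alt text := by
  rw [join_name_eq, join_name_alt_eq, Afold, Bfold]
  have := main_lemma (PySem.Str.split₀ text).length (PySem.Str.split₀ text) [] le_rfl (Or.inl rfl)
  simp only [reduceIte] at this
  rw [String.empty_append, List.nil_append, this]

-- ===== VERDICT (by name: the statement is the Claim_ definition above) =====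
theorem join_name_spec : Claim_equal_join_name := by
  intro text _
  exact ports_agree text
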